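-- pv_equiv track=rewrite | github.com/Steilblack/-2.1 | Практическая 2-5/Задание 2.py | calculate
-- ===== SOURCE A (Python) =====
-- def calculate(arr):
--     positive = []
--     for i in arr:
--         if i > 0:
--             positive.append(i)
--     sum_pos = sum(positive)
--     min_value = min(arr)
--     min_index = arr.index(min_value)
--     max_value = max(arr)
--     max_index = arr.index(max_value)
--     start = min(min_index, max_index)
--     end = max(min_index, max_index)
--     multiplication = 1
--     for i in range(start, end + 1):
--         multiplication *= arr[i]
--     return sum_pos, multiplication
-- ===== SOURCE B (Python) =====
-- def calculate(arr):
--     if not arr: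
--         raise ValueError("min() arg is an empty sequence")
--
--     # Divide and conquer: solve(lo, hi) returns, for the segment arr[lo:hi),
--     # (sum of positives, min value, first index of min, max value, first index of max).
--     def solve(lo, hi):
--         if hi - lo == 1:
--             v = arr[lo]
--             return (v if v > 0 else 0, v, lo, v, lo)
--         mid = (lo + hi) // 2
--         ls, lmv, lmi, lMv, lMi = solve(lo, mid)
--         rs, rmv, rmi, rMv, rMi = solve(mid, hi)
--         mv, mi = (lmv, lmi) if lmv <= rmv else (rmv, rmi)
--         Mv, Mi = (lMv, lMi) if lMv >= rMv else (rMv, rMi)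
--         return (ls + rs, mv, mi, Mv, Mi)
--
--     s, _, mi, _, Mi = solve(0, len(arr))
--     a, b = (mi, Mi) if mi <= Mi else (Mi, mi)
--     prod = 1
--     for v in arr[a:b + 1]:
--         prod *= v
--     return (s, prod)
-- ===== Notes on version B (the rewrite author's own statement) =====
-- stated objective: alternative
-- what changed: Replaces A's five sequential whole-list passes (filter positives, min(), index(), max(), index()) and index-by-index product loop with a divide-and-conquer recursion that splits the list in half and merges (positive sum, min value+first index, max value+first index) from the two halves, then multiplies over the slice arr[a:b+1].
import Mathlib
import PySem

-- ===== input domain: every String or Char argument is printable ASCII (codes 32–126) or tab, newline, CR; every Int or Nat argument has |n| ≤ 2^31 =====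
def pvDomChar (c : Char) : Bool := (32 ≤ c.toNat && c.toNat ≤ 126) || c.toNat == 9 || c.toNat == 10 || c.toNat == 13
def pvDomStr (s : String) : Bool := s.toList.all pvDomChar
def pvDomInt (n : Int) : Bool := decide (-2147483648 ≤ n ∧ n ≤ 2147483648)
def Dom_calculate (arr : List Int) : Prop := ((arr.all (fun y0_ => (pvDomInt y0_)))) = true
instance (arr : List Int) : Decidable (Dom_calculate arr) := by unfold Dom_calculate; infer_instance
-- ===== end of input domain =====

-- B replaces A's five sequential whole-list passes (filter positives, min, index, max, index)
-- and its index-by-index product loop by a divide-and-conquer recursion that splits the list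
-- in half and merges (positive sum, min/first index, max/first index), then multiplies over
-- the slice arr[a:b+1]; objective: alternative.

-- ===== PORT A =====
def calculate (arr : List Int) : Int × Int :=
  let positive : List Int := arr.foldl (fun acc i => if i > 0 then acc ++ [i] else acc) []
  let sum_pos : Int := positive.foldl (· + ·) 0
  let min_value : Int := (PySem.List.min? arr (fun y => y)).getD 0
  let min_index : Int := ((PySem.List.index? arr min_value).getD 0 : Nat)
  let max_value : Int := (PySem.List.max? arr (fun y => y)).getD 0
  let max_index : Int := ((PySem.List.index? arr max_value).getD 0 : Nat)
  let start := min min_index max_index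
  let stop := max min_index max_index
  let multiplication : Int :=
    (PySem.List.pyRange start (stop + 1) 1).foldl (fun m i => m * PySem.List.pyGetD arr i 0) 1
  (sum_pos, multiplication)

-- ===== PORT B =====
-- merge step of Source B's solve: combines the two halves' (sum_pos, min_v, min_i, max_v, max_i)
def pvMergeB (L R : Int × Int × Int × Int × Int) : Int × Int × Int × Int × Int :=
  let mv := if L.2.1 ≤ R.2.1 then (L.2.1, L.2.2.1) else (R.2.1, R.2.2.1)
  let Mv := if L.2.2.2.1 ≥ R.2.2.2.1 then (L.2.2.2.1, L.2.2.2.2) else (R.2.2.2.1, R.2.2.2.2)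
  (L.1 + R.1, mv.1, mv.2, Mv.1, Mv.2)

-- Source B's solve(lo, hi); only called with lo < hi, so Python's 'hi - lo == 1' test is
-- written 'hi ≤ lo + 1'; the extra fuel argument (always ≥ hi - lo at every call) only
-- makes the recursion structural, it never changes the computed value.
def pvSolve (arr : List Int) : Nat → Nat → Nat → Int × Int × Int × Int × Int
  | 0, lo, _ =>
    let v := PySem.List.pyGetD arr (lo : Int) 0
    ((if v > 0 then v else 0), v, (lo : Int), v, (lo : Int))
  | fuel + 1, lo, hi =>
    if hi ≤ lo + 1 then
      let v := PySem.List.pyGetD arr (lo : Int) 0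
      ((if v > 0 then v else 0), v, (lo : Int), v, (lo : Int))
    else
      pvMergeB (pvSolve arr fuel lo ((lo + hi) / 2)) (pvSolve arr fuel ((lo + hi) / 2) hi)

def calculate_alt (arr : List Int) : Int × Int :=
  match arr with
  | [] => (0, 0)   -- Python B raises ValueError here; outside Pre_
  | _ :: _ =>
    let st := pvSolve arr arr.length 0 arr.length
    let ab := if st.2.2.1 ≤ st.2.2.2.2 then (st.2.2.1, st.2.2.2.2) else (st.2.2.2.2, st.2.2.1)
    let prod := (PySem.List.slice arr (some ab.1) (some (ab.2 + 1))).foldl (· * ·) 1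
    (st.1, prod)

-- ===== PRECONDITION & SPEC =====
-- Python A raises ValueError (min of empty sequence) on the empty list; Pre_ excludes exactly that input.
def Pre_calculate (arr : List Int) : Prop := arr ≠ []
instance (arr : List Int) : Decidable (Pre_calculate arr) := by unfold Pre_calculate; infer_instance
def pvWitness_calculate : List Int := ([1, -2, 3] : List Int)

def Spec_calculate (arr : List Int) (out : Int × Int) : Prop := out = calculate_alt arr
instance (arr : List Int) (out : Int × Int) : Decidable (Spec_calculate arr out) := by unfold Spec_calculate; infer_instance

-- ===== CLAIM (what is proved, stated in full; the proofs are below) =====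
def Claim_equal_calculate : Prop := ∀ (arr : List Int), Dom_calculate arr → Pre_calculate arr → Spec_calculate arr (calculate arr)

-- ===== LEMMAS AND PROOFS =====

-- A's positive-collecting loop is filtering.
theorem pvFoldlPos (l acc : List Int) :
    l.foldl (fun acc i => if i > 0 then acc ++ [i] else acc) acc
      = acc ++ l.filter (fun i => decide (i > 0)) := by
  induction l generalizing acc with
  | nil => simp
  | cons y ys ih =>
    simp only [List.foldl_cons, List.filter_cons]
    by_cases h : y > 0 <;> simp [h, ih]

theorem pvFoldlMin (u : List Int) : ∀ a y : Int,
    List.foldl min (min a y) u = min a (List.foldl min y u) := by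
  induction u with
  | nil => intro a y; rfl
  | cons z u ih =>
    intro a y
    simp only [List.foldl_cons, min_assoc]
    exact ih a (min y z)

theorem pvFoldlMax (u : List Int) : ∀ a y : Int,
    List.foldl max (max a y) u = max a (List.foldl max y u) := by
  induction u with
  | nil => intro a y; rfl
  | cons z u ih =>
    intro a y
    simp only [List.foldl_cons, max_assoc]
    exact ih a (max y z)

-- first extremum of a concatenation, value part
theorem pvMinAppend (l r : List Int) (a b : Int)
    (ha : PySem.List.min? l (fun y => y) = some a)
    (hb : PySem.List.min? r (fun y => y) = some b) :
    PySem.List.min? (l ++ r) (fun y => y) = some (min a b) := by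
  match l, r with
  | [], _ => simp [PySem.List.min?] at ha
  | _, [] => simp [PySem.List.min?] at hb
  | x :: t, y :: u =>
    rw [PySem.List.min?_id_cons] at ha
    rw [PySem.List.min?_id_cons] at hb
    have : (x :: t) ++ (y :: u) = x :: (t ++ (y :: u)) := rfl
    rw [this, PySem.List.min?_id_cons, List.foldl_append]
    rw [Option.some_inj] at ha hb
    subst ha hb
    simp only [List.foldl_cons, pvFoldlMin]

theorem pvMaxAppend (l r : List Int) (a b : Int)
    (ha : PySem.List.max? l (fun y => y) = some a)
    (hb : PySem.List.max? r (fun y => y) = some b) :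
    PySem.List.max? (l ++ r) (fun y => y) = some (max a b) := by
  match l, r with
  | [], _ => simp [PySem.List.max?] at ha
  | _, [] => simp [PySem.List.max?] at hb
  | x :: t, y :: u =>
    rw [PySem.List.max?_id_cons] at ha
    rw [PySem.List.max?_id_cons] at hb
    have : (x :: t) ++ (y :: u) = x :: (t ++ (y :: u)) := rfl
    rw [this, PySem.List.max?_id_cons, List.foldl_append]
    rw [Option.some_inj] at ha hb
    subst ha hb
    simp only [List.foldl_cons, pvFoldlMax]

-- first index in a concatenation when the element is absent from the left part
theorem pvIndexAppend (l r : List Int) (v : Int) (hv : v ∉ l) :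
    PySem.List.index? (l ++ r) v = (PySem.List.index? r v).map (· + l.length) := by
  induction l with
  | nil => simp
  | cons c l ih =>
    have hcv : c ≠ v := fun h => hv (by simp [h])
    have hvl : v ∉ l := fun h => hv (by simp [h])
    rw [List.cons_append, PySem.List.index?_cons_of_ne (l ++ r) hcv, ih hvl]
    cases PySem.List.index? r v <;> simp <;> omega

-- Characterisation of Source B's divide-and-conquer solve on the segment arr[lo:hi):
-- positive sum, first minimum and first maximum with their absolute indices.
theorem pvSolve_char (arr : List Int) : ∀ (n lo hi : Nat), hi - lo ≤ n → lo < hi → hi ≤ arr.length →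
    ∃ (m M : Int) (im iM : Nat),
      PySem.List.min? ((arr.drop lo).take (hi - lo)) (fun y => y) = some m ∧
      PySem.List.index? ((arr.drop lo).take (hi - lo)) m = some im ∧
      PySem.List.max? ((arr.drop lo).take (hi - lo)) (fun y => y) = some M ∧
      PySem.List.index? ((arr.drop lo).take (hi - lo)) M = some iM ∧
      pvSolve arr n lo hi =
        ((((arr.drop lo).take (hi - lo)).filter (fun i => decide (i > 0))).sum,
         m, (lo : Int) + im, M, (lo : Int) + iM) := by
  intro n
  induction n with
  | zero => intro lo hi h1 h2 _; omega
  | succ n ih =>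
    intro lo hi hn hlh hlen
    by_cases hbase : hi ≤ lo + 1
    · -- base: segment of length 1
      have hhi : hi = lo + 1 := by omega
      have hlo : lo < arr.length := by omega
      have hseg : (arr.drop lo).take (hi - lo) = [arr[lo]] := by
        rw [hhi, show lo + 1 - lo = 1 by omega, List.drop_eq_getElem_cons hlo,
          List.take_succ_cons, List.take_zero]
      refine ⟨arr[lo], arr[lo], 0, 0, ?_, ?_, ?_, ?_, ?_⟩
      · rw [hseg, PySem.List.min?_id_cons]; rfl
      · rw [hseg]; exact PySem.List.index?_cons_self _ _
      · rw [hseg, PySem.List.max?_id_cons]; rfl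
      · rw [hseg]; exact PySem.List.index?_cons_self _ _
      · rw [show pvSolve arr (n + 1) lo hi = ((if PySem.List.pyGetD arr (lo : Int) 0 > 0
              then PySem.List.pyGetD arr (lo : Int) 0 else 0), PySem.List.pyGetD arr (lo : Int) 0,
              (lo : Int), PySem.List.pyGetD arr (lo : Int) 0, (lo : Int))
            by simp only [pvSolve, if_pos hbase], hseg]
        have hget : PySem.List.pyGetD arr (lo : Int) 0 = arr[lo] := by
          rw [PySem.List.pyGetD_natCast]; exact List.getD_eq_getElem _ _ hlo
        simp only [hget, List.filter_cons]
        by_cases h : arr[lo] > 0 <;> simp [h]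
    · -- recursive case
      have hmid1 : lo < (lo + hi) / 2 := by omega
      have hmid2 : (lo + hi) / 2 < hi := by omega
      set mid := (lo + hi) / 2 with hmiddef
      obtain ⟨a, A', ia, iA, hminL, hidxaL, hmaxL, hidxAL, hsolveL⟩ :=
        ih lo mid (by omega) hmid1 (by omega)
      obtain ⟨b, B', ib, iB, hminR, hidxbR, hmaxR, hidxBR, hsolveR⟩ :=
        ih mid hi (by omega) hmid2 hlen
      set segL := (arr.drop lo).take (mid - lo) with hsegLdef
      set segR := (arr.drop mid).take (hi - mid) with hsegRdef
      have hsplit : (arr.drop lo).take (hi - lo) = segL ++ segR := by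
        rw [hsegLdef, hsegRdef]
        rw [show hi - lo = (mid - lo) + (hi - mid) by omega, List.take_add,
          List.drop_drop, show lo + (mid - lo) = mid by omega]
      have hlenL : segL.length = mid - lo := by
        rw [hsegLdef]; simp; omega
      have hsolve : pvSolve arr (n + 1) lo hi
          = pvMergeB (pvSolve arr n lo mid) (pvSolve arr n mid hi) := by
        simp only [pvSolve, if_neg hbase, ← hmiddef]
      rw [hsolve, hsolveL, hsolveR]
      have hsum : ((segL ++ segR).filter (fun i => decide (i > 0))).sum
          = (segL.filter (fun i => decide (i > 0))).sum
            + (segR.filter (fun i => decide (i > 0))).sum := by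
        rw [List.filter_append, List.sum_append]
      by_cases hab : a ≤ b
      · -- min comes from the left half
        by_cases hAB : A' ≥ B'
        · refine ⟨a, A', ia, iA, ?_, ?_, ?_, ?_, ?_⟩
          · rw [hsplit]; rw [pvMinAppend segL segR a b hminL hminR, min_eq_left hab]
          · rw [hsplit, PySem.List.index?_append_of_mem segR (PySem.List.min?_mem hminL), hidxaL]
          · rw [hsplit]; rw [pvMaxAppend segL segR A' B' hmaxL hmaxR, max_eq_left hAB]
          · rw [hsplit, PySem.List.index?_append_of_mem segR (PySem.List.max?_mem hmaxL), hidxAL]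
          · simp only [pvMergeB, hsum, if_pos hab, if_pos hAB, hsplit]
        · push_neg at hAB
          have hBnotL : B' ∉ segL := fun h =>
            absurd (PySem.List.max?_isMax hmaxL B' h) (not_le.mpr hAB)
          refine ⟨a, B', ia, iB + segL.length, ?_, ?_, ?_, ?_, ?_⟩
          · rw [hsplit]; rw [pvMinAppend segL segR a b hminL hminR, min_eq_left hab]
          · rw [hsplit, PySem.List.index?_append_of_mem segR (PySem.List.min?_mem hminL), hidxaL]
          · rw [hsplit]; rw [pvMaxAppend segL segR A' B' hmaxL hmaxR, max_eq_right hAB.le]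
          · rw [hsplit, pvIndexAppend segL segR B' hBnotL, hidxBR]; rfl
          · simp [pvMergeB, hsum, if_pos hab, if_neg (not_le.mpr hAB), hsplit, hlenL]
            push_cast; omega
      · -- min comes from the right half
        push_neg at hab
        have hbnotL : b ∉ segL := fun h =>
          absurd (PySem.List.min?_isMin hminL b h) (not_le.mpr hab)
        by_cases hAB : A' ≥ B'
        · refine ⟨b, A', ib + segL.length, iA, ?_, ?_, ?_, ?_, ?_⟩
          · rw [hsplit]; rw [pvMinAppend segL segR a b hminL hminR, min_eq_right hab.le]
          · rw [hsplit, pvIndexAppend segL segR b hbnotL, hidxbR]; rfl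
          · rw [hsplit]; rw [pvMaxAppend segL segR A' B' hmaxL hmaxR, max_eq_left hAB]
          · rw [hsplit, PySem.List.index?_append_of_mem segR (PySem.List.max?_mem hmaxL), hidxAL]
          · simp [pvMergeB, hsum, if_neg (not_le.mpr hab), if_pos hAB, hsplit, hlenL]
            push_cast; omega
        · push_neg at hAB
          have hBnotL : B' ∉ segL := fun h =>
            absurd (PySem.List.max?_isMax hmaxL B' h) (not_le.mpr hAB)
          refine ⟨b, B', ib + segL.length, iB + segL.length, ?_, ?_, ?_, ?_, ?_⟩
          · rw [hsplit]; rw [pvMinAppend segL segR a b hminL hminR, min_eq_right hab.le]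
          · rw [hsplit, pvIndexAppend segL segR b hbnotL, hidxbR]; rfl
          · rw [hsplit]; rw [pvMaxAppend segL segR A' B' hmaxL hmaxR, max_eq_right hAB.le]
          · rw [hsplit, pvIndexAppend segL segR B' hBnotL, hidxBR]; rfl
          · simp [pvMergeB, hsum, if_neg (not_le.mpr hab), if_neg (not_le.mpr hAB), hsplit, hlenL]
            push_cast; omega

-- A's indexed product over range(a,b) equals B's product over the slice xs[a:b].
theorem pvProd_range_slice (xs : List Int) (a b : Nat) (hab : a ≤ b) (hb : b ≤ xs.length) :
    (PySem.List.pyRange (a : Int) (b : Int) 1).foldl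
        (fun m i => m * PySem.List.pyGetD xs i 0) 1
      = (PySem.List.slice xs (some (a : Int)) (some (b : Int))).foldl (· * ·) 1 := by
  have hmap : (PySem.List.pyRange (a : Int) (b : Int) 1).map
      (fun i => PySem.List.pyGetD xs i 0) = (xs.drop a).take (b - a) := by
    apply List.ext_getElem
    · simp only [List.length_map, PySem.List.length_pyRange_one, List.length_take,
        List.length_drop]
      omega
    · intro k h1 h2
      have hk : k < b - a := by
        simpa [PySem.List.length_pyRange_one] using h1
      have hlt : ((a : Int) + k) < xs.length := by
        omega
      simp only [List.getElem_map, PySem.List.getElem_pyRange_one]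
      rw [PySem.List.pyGetD_eq_getElem xs 0 (by positivity) hlt]
      simp only [List.getElem_take, List.getElem_drop]
      congr 1
  rw [PySem.List.slice_natCast, ← hmap, List.foldl_map]

-- ===== VERDICT (by name: the statement is the Claim_ definition above) =====
theorem calculate_spec : Claim_equal_calculate := by
  intro arr _ hpre
  unfold Spec_calculate
  match arr, hpre with
  | x :: t, _ =>
    obtain ⟨m, M, im, iM, hmin, hidxm, hmax, hidxM, hsolve⟩ :=
      pvSolve_char (x :: t) (x :: t).length 0 (x :: t).length (by omega) (by simp) (le_refl _)
    rw [Nat.sub_zero, List.drop_zero, List.take_length] at hmin hidxm hmax hidxM hsolve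
    obtain ⟨himlt, -, -⟩ := PySem.List.getElem_of_index?_eq_some hidxm
    obtain ⟨hiMlt, -, -⟩ := PySem.List.getElem_of_index?_eq_some hidxM
    show calculate (x :: t) = calculate_alt (x :: t)
    unfold calculate calculate_alt
    rw [pvFoldlPos]
    simp only [hmin, hmax, Option.getD_some, hidxm, hidxM, hsolve, List.nil_append,
      Nat.cast_zero, zero_add]
    rw [← Nat.cast_min, ← Nat.cast_max,
      show ((max im iM : Nat) : Int) + 1 = ((max im iM + 1 : Nat) : Int) by push_cast; ring,
      pvProd_range_slice (x :: t) (min im iM) (max im iM + 1) (by omega)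
        (by simp only [List.length_cons] at himlt hiMlt ⊢; omega)]
    rw [Prod.mk.injEq]
    refine ⟨?_, ?_⟩
    · simp [List.sum_eq_foldl]
    · by_cases h : im ≤ iM
      · rw [min_eq_left h, max_eq_right h,
          if_pos (show ((im : Int) ≤ (iM : Int)) by exact_mod_cast h)]
        push_cast
        rfl
      · push_neg at h
        rw [min_eq_right h.le, max_eq_left h.le,
          if_neg (show ¬ ((im : Int) ≤ (iM : Int)) by exact_mod_cast not_le.mpr h)]
        push_cast
        rfl
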